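-- pv_equiv track=rewrite | github.com/irenenikk/advent-of-code-18 | 5/5.2.py | react_polymer
-- ===== SOURCE A (Python) =====
-- def react(a, b):
--     if a.isupper() and a.lower() == b:
--         return True
--     if b.isupper() and b.lower() == a:
--         return True
--     return False
--
-- def react_polymer(inputs):
--     stack = list()
--     for char in inputs:
--         if (len(stack) == 0):
--             stack.append(char)
--             continue
--         # peek stack
--         top = stack[-1]
--         if react(char, top):
--             stack.pop()
--         else:
--             stack.append(char)
--     return len(stack)
-- ===== SOURCE B (Python) =====
-- def react(a, b):
--     if a.isupper() and a.lower() == b: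
--         return True
--     if b.isupper() and b.lower() == a:
--         return True
--     return False
--
-- def react_polymer(inputs):
--     chars = list(inputs)
--     changed = True
--     while changed:
--         changed = False
--         out = []
--         i = 0
--         n = len(chars)
--         while i < n:
--             if i + 1 < n and react(chars[i], chars[i + 1]):
--                 i += 2
--                 changed = True
--             else:
--                 out.append(chars[i])
--                 i += 1
--         chars = out
--     return len(chars)
-- ===== Notes on version B (the rewrite author's own statement) =====
-- stated objective: alternative
-- what changed: Replaced the single-pass stack reduction with a fixpoint of left-to-right scans that remove adjacent reacting pairs until a whole pass removes nothing; confluence of the cancellation makes the final length equal.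
import Mathlib
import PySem

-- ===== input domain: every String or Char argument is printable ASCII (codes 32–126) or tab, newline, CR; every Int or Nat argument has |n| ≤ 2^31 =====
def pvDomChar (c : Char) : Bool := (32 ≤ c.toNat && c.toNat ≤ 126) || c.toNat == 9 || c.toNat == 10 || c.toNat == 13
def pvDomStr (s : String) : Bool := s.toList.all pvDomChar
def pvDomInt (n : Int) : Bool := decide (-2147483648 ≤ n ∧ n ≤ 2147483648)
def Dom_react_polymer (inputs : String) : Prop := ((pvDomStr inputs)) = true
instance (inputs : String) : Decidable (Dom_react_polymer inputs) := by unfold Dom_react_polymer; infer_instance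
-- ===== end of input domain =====

-- B replaces A's single stack pass by repeated pair-removal scans to a fixpoint (alternative algorithm, same result).

-- ===== PORT A =====
-- react(a, b): a.isupper() and a.lower() == b, or symmetrically (PySem char ops, exact on ASCII)
def react (a b : Char) : Bool :=
  if PySem.Chars.isupper a && (PySem.Chars.lowerChar a == b) then true
  else if PySem.Chars.isupper b && (PySem.Chars.lowerChar b == a) then true
  else false

-- one iteration of A's `for char in inputs` body: push on empty, else peek top (= last), pop or push
def stepA (stack : List Char) (c : Char) : List Char :=
  if stack.length = 0 then stack ++ [c]
  else
    let top := stack.getLastD ' '   -- stack[-1]; stack is nonempty on this branch, default unused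
    if react c top then stack.dropLast else stack ++ [c]

def react_polymer (inputs : String) : Int :=
  ((inputs.toList.foldl stepA []).length : Int)

-- ===== PORT B =====
-- B's inner while: scan left to right, removing each adjacent reacting pair, flag if any removal
def onePass : List Char → List Char × Bool
  | [] => ([], false)
  | [c] => ([c], false)
  | c :: d :: t =>
    if react c d then ((onePass t).1, true)
    else
      let r := onePass (d :: t)
      (c :: r.1, r.2)

-- used by fixLoop's termination argument (cited in decreasing_by, so it stays above the port)
theorem onePass_len_le : ∀ (l : List Char), (onePass l).1.length ≤ l.length := by
  intro l
  induction l using onePass.induct with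
  | case1 => simp [onePass]
  | case2 c => simp [onePass]
  | case3 c d t h ih => simp only [onePass, h, if_pos]; simp; omega
  | case4 c d t h ih =>
      simp only [onePass, h, Bool.false_eq_true, if_false]
      simp at ih ⊢; omega

theorem onePass_len_lt (l : List Char) (h : (onePass l).2 = true) :
    (onePass l).1.length < l.length := by
  induction l using onePass.induct with
  | case1 => simp [onePass] at h
  | case2 c => simp [onePass] at h
  | case3 c d t hr ih =>
      simp only [onePass, hr, if_pos]
      have := onePass_len_le t
      simp; omega
  | case4 c d t hr ih =>
      simp only [onePass, hr, Bool.false_eq_true, if_false] at h ⊢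
      have := ih h
      simp at this ⊢
      omega

-- B's outer while-changed loop
def fixLoop (l : List Char) : List Char :=
  let r := onePass l
  if h : r.2 = true then fixLoop r.1 else r.1
termination_by l.length
decreasing_by exact onePass_len_lt l h

def react_polymer_alt (inputs : String) : Int :=
  ((fixLoop inputs.toList).length : Int)

-- ===== PRECONDITION & SPEC =====
def Spec_react_polymer (inputs : String) (out : Int) : Prop := out = react_polymer_alt inputs
instance (inputs : String) (out : Int) : Decidable (Spec_react_polymer inputs out) := by unfold Spec_react_polymer; infer_instance

-- ===== CLAIM (what is proved, stated in full; the proofs are below) =====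
def Claim_equal_react_polymer : Prop := ∀ (inputs : String), Dom_react_polymer inputs → Spec_react_polymer inputs (react_polymer inputs)

-- ===== LEMMAS AND PROOFS =====

-- the canonical one-pass reduction (right fold), the common reference both ports are reduced to
def step (c : Char) (r : List Char) : List Char :=
  match r with
  | [] => [c]
  | b :: t => if react c b then t else c :: b :: t

def reduce (l : List Char) : List Char := l.foldr step []

-- a list with no adjacent reacting pair
def Irr : List Char → Prop
  | [] => True
  | [_] => True
  | a :: b :: t => react a b = false ∧ Irr (b :: t)

theorem irr_tail (a : Char) (l : List Char) (h : Irr (a :: l)) : Irr l := by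
  cases l with
  | nil => trivial
  | cons b t => exact h.2

theorem irr_head (a b : Char) (t : List Char) (h : Irr (a :: b :: t)) :
    react a b = false := h.1

theorem irr_cons (a b : Char) (t : List Char) (h1 : react a b = false)
    (h2 : Irr (b :: t)) : Irr (a :: b :: t) := ⟨h1, h2⟩

-- arithmetic characterisation of the char primitives
theorem isupper_iff (c : Char) : PySem.Chars.isupper c = true ↔ 65 ≤ c.toNat ∧ c.toNat ≤ 90 := by
  simp only [PySem.Chars.isupper, Bool.and_eq_true, decide_eq_true_eq, Char.le_def,
    UInt32.le_iff_toNat_le]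
  exact Iff.rfl

theorem toNat_lowerChar (c : Char) (h : PySem.Chars.isupper c = true) :
    (PySem.Chars.lowerChar c).toNat = c.toNat + 32 := by
  have h' := (isupper_iff c).1 h
  have hv : (c.toNat + 32).isValidChar := Or.inl (by omega)
  unfold PySem.Chars.lowerChar
  rw [if_pos h, Char.toNat_ofNat, if_pos hv]

theorem char_toNat_inj (a b : Char) (h : a.toNat = b.toNat) : a = b := by
  have := congrArg UInt32.ofNat h
  rw [Char.ofNat_toNat_eq_val, Char.ofNat_toNat_eq_val] at this
  exact Char.ext this

theorem react_eq (a b : Char) :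
    react a b = ((PySem.Chars.isupper a && (PySem.Chars.lowerChar a == b)) ||
                 (PySem.Chars.isupper b && (PySem.Chars.lowerChar b == a))) := by
  unfold react
  by_cases h1 : (PySem.Chars.isupper a && (PySem.Chars.lowerChar a == b)) = true <;>
  by_cases h2 : (PySem.Chars.isupper b && (PySem.Chars.lowerChar b == a)) = true <;>
  simp [h1, h2]

theorem react_symm (a b : Char) : react a b = react b a := by
  rw [react_eq, react_eq, Bool.or_comm]

theorem react_lcancel (a b c : Char) (h1 : react a b = true) (h2 : react b c = true) :
    c = a := by
  rw [react_eq] at h1 h2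
  simp only [Bool.or_eq_true, Bool.and_eq_true, beq_iff_eq] at h1 h2
  rcases h1 with ⟨ha, hab⟩ | ⟨hb, hba⟩
  · -- a upper, b = a.lower: b is not upper, so in h2 c must be upper with c.lower = b
    have hbn : b.toNat = a.toNat + 32 := by rw [← hab]; exact toNat_lowerChar a ha
    have ha' := (isupper_iff a).1 ha
    rcases h2 with ⟨hb', _⟩ | ⟨hc, hcb⟩
    · have := (isupper_iff b).1 hb'; omega
    · have hc' := toNat_lowerChar c hc
      rw [hcb] at hc'
      exact char_toNat_inj c a (by omega)
  · -- b upper, a = b.lower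
    have hb' := (isupper_iff b).1 hb
    rcases h2 with ⟨_, hbc⟩ | ⟨hc, hcb⟩
    · rw [← hba, hbc]
    · have hc' := toNat_lowerChar c hc
      rw [hcb] at hc'
      have := (isupper_iff c).1 hc
      omega

-- the commuting square: one `step` at the left end commutes with one A-step at the right end
theorem step_stepA_comm (r : List Char) (a c : Char) :
    step a (stepA r c) = stepA (step a r) c := by
  cases r with
  | nil =>
      have h0 : stepA [] c = [c] := by simp [stepA]
      show step a (stepA [] c) = stepA [a] c
      rw [h0]
      by_cases h : react a c = true <;>
        simp [h, stepA, step, react_symm c a]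
  | cons b t =>
      by_cases hab : react a b = true
      · simp only [step, hab, if_pos]
        cases t with
        | nil =>
            by_cases hcb : react c b = true
            · have hca : c = a := react_lcancel a b c hab (by rw [react_symm]; exact hcb)
              simp [stepA, step, hcb, hca, hab]
            · simp [stepA, step, hcb, hab]
        | cons d t' =>
            by_cases hcl : react c ((d :: t').getLast?.getD ' ') = true
            · simp [stepA, step, List.getLastD_cons, hcl, hab]
            · simp [stepA, step, List.getLastD_cons, hcl, hab]
      · simp only [step, hab, Bool.not_eq_true, if_neg]
        cases t with
        | nil =>
            by_cases hcb : react c b = true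
            · simp [stepA, step, hcb, hab, List.getLastD_cons]
            · simp [stepA, step, hcb, hab, List.getLastD_cons]
        | cons d t' =>
            by_cases hcl : react c ((d :: t').getLast?.getD ' ') = true
            · simp [stepA, step, List.getLastD_cons, hcl, hab]
            · simp [stepA, step, List.getLastD_cons, hcl, hab]

theorem reduce_append_singleton (l : List Char) (c : Char) :
    reduce (l ++ [c]) = stepA (reduce l) c := by
  induction l with
  | nil => simp [reduce, step, stepA]
  | cons a l ih =>
      show step a (reduce (l ++ [c])) = stepA (step a (reduce l)) c
      rw [ih, step_stepA_comm]

theorem foldA_eq_reduce (l : List Char) : l.foldl stepA [] = reduce l := by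
  induction l using List.reverseRecOn with
  | nil => simp [reduce]
  | append_singleton l c ih =>
      rw [List.foldl_append, ih, List.foldl_cons, List.foldl_nil, reduce_append_singleton]

theorem irr_reduce (l : List Char) : Irr (reduce l) := by
  induction l with
  | nil => trivial
  | cons c l ih =>
      show Irr (step c (reduce l))
      cases h : reduce l with
      | nil => simp only [step]; trivial
      | cons b t =>
          rw [h] at ih
          by_cases hcb : react c b = true
          · simp only [step, hcb, if_pos]
            exact irr_tail b t ih
          · simp only [step, hcb, Bool.not_eq_true, if_neg]
            exact irr_cons c b t (by simpa using hcb) ih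

theorem reduce_of_irr (l : List Char) (h : Irr l) : reduce l = l := by
  induction l with
  | nil => rfl
  | cons c l ih =>
      show step c (reduce l) = c :: l
      rw [ih (irr_tail c l h)]
      cases l with
      | nil => simp [step]
      | cons b t => simp [step, irr_head c b t h]

theorem reduce_cons_cons_of_react (c d : Char) (t : List Char) (h : react c d = true) :
    reduce (c :: d :: t) = reduce t := by
  show step c (step d (reduce t)) = reduce t
  have hirr := irr_reduce t
  cases hr : reduce t with
  | nil => simp [step, h]
  | cons b t' =>
      rw [hr] at hirr
      by_cases hdb : react d b = true
      · have hcb : c = b := (react_lcancel c d b h hdb).symm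
        simp only [step, hdb, if_pos]
        cases t' with
        | nil => simp [step, hcb]
        | cons e t'' =>
            have : react b e = false := irr_head b e t'' hirr
            simp [step, hcb, this]
      · simp [step, hdb, h]

theorem reduce_onePass (l : List Char) : reduce ((onePass l).1) = reduce l := by
  induction l using onePass.induct with
  | case1 => rfl
  | case2 c => rfl
  | case3 c d t h ih =>
      simp only [onePass, h, if_pos]
      rw [ih, reduce_cons_cons_of_react c d t h]
  | case4 c d t h ih =>
      simp only [onePass, h, Bool.false_eq_true, if_false]
      show step c (reduce (onePass (d :: t)).1) = step c (reduce (d :: t))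
      rw [ih]

theorem onePass_false (l : List Char) (h : (onePass l).2 = false) :
    (onePass l).1 = l ∧ Irr l := by
  induction l using onePass.induct with
  | case1 => exact ⟨rfl, trivial⟩
  | case2 c => exact ⟨rfl, trivial⟩
  | case3 c d t hr ih => simp [onePass, hr] at h
  | case4 c d t hr ih =>
      simp only [onePass, hr, Bool.false_eq_true, if_false] at h ⊢
      obtain ⟨h1, h2⟩ := ih h
      exact ⟨by rw [h1], irr_cons c d t (by simpa using hr) h2⟩

theorem fixLoop_eq_reduce (l : List Char) : fixLoop l = reduce l := by
  rw [fixLoop]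
  by_cases h : (onePass l).2 = true
  · simp only [h, dif_pos]
    have hlt : (onePass l).1.length < l.length := onePass_len_lt l h
    rw [fixLoop_eq_reduce (onePass l).1, reduce_onePass]
  · rw [dif_neg h]
    obtain ⟨h1, h2⟩ := onePass_false l (by simpa using h)
    rw [h1, reduce_of_irr l h2]
termination_by l.length
decreasing_by exact onePass_len_lt l h

-- ===== VERDICT (by name: the statement is the Claim_ definition above) =====
theorem react_polymer_spec : Claim_equal_react_polymer := by
  intro inputs _
  show react_polymer inputs = react_polymer_alt inputs
  unfold react_polymer react_polymer_alt
  rw [foldA_eq_reduce, fixLoop_eq_reduce]
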